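-- pv_equiv track=rewrite | github.com/sorinmilu/Master-SEMBSI | CODE/ExpertSystems/ConstraintBased/constrained.py | expanded_possible_slots
-- ===== SOURCE A (Python) =====
-- camere = [1, 2, 3]
--
-- sloturi = {
--     'M': ['8-10', '10-12'],
--     'A': ['12-14', '14-16', '16-18']
-- }
--
-- perioade = ['M', 'A']
--
-- def expanded_possible_slots(persoana):
--     if persoana == 'P1':
--         return [(slot, r) for slot in sloturi['M'] for r in [2, 3]]
--     elif persoana == 'P2':
--         return [(slot, r) for slot in sloturi['M'] for r in camere]
--     elif persoana == 'P3':
--         return [(slot, 3) for slot in sloturi['A']]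
--     elif persoana == 'P4':
--         return [(slot, r) for slot in sloturi['A'] for r in [2, 3]]
--     elif persoana == 'P5':
--         return [(slot, 1) for slot in sloturi['M']]
--     elif persoana == 'P6':
--         return [(slot, r) for slot in sloturi['A'] for r in camere]
--     elif persoana == 'P7':
--         return [(slot, 2) for t in perioade for slot in sloturi[t]]
--     elif persoana == 'P8':
--         return [(slot, 1) for slot in sloturi['A']]
--     elif persoana == 'P9':
--         return [(slot, r) for slot in sloturi['M'] for r in camere if r != 3]
--     elif persoana == 'P10':
--         return [(slot, r) for t in perioade for slot in sloturi[t] for r in camere]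
--     else:
--         return [(slot, r) for t in perioade for slot in sloturi[t] for r in camere]
-- ===== SOURCE B (Python) =====
-- camere = [1, 2, 3]
--
-- sloturi = {
--     'M': ['8-10', '10-12'],
--     'A': ['12-14', '14-16', '16-18']
-- }
--
-- perioade = ['M', 'A']
--
-- def _allowed(persoana, t, r):
--     """Constraint predicate: may `persoana` sit in room r during period t?"""
--     if persoana == 'P1':
--         return t == 'M' and r in (2, 3)
--     if persoana == 'P2':
--         return t == 'M'
--     if persoana == 'P3':
--         return t == 'A' and r == 3
--     if persoana == 'P4':
--         return t == 'A' and r in (2, 3)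
--     if persoana == 'P5':
--         return t == 'M' and r == 1
--     if persoana == 'P6':
--         return t == 'A'
--     if persoana == 'P7':
--         return r == 2
--     if persoana == 'P8':
--         return t == 'A' and r == 1
--     if persoana == 'P9':
--         return t == 'M' and r != 3
--     return True
--
-- def expanded_possible_slots(persoana):
--     # generate-and-test: enumerate the whole grid once, keep the allowed cells
--     return [(slot, r)
--             for t in perioade
--             for slot in sloturi[t]
--             for r in camere
--             if _allowed(persoana, t, r)]
-- ===== Notes on version B (the rewrite author's own statement) =====
-- stated objective: alternative
-- what changed: Replaced A's ten branch-local comprehensions (each generating a different product) by a generate-and-test pass: enumerate the full period x slot x room grid once and filter it through a per-person constraint predicate.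
import Mathlib
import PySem

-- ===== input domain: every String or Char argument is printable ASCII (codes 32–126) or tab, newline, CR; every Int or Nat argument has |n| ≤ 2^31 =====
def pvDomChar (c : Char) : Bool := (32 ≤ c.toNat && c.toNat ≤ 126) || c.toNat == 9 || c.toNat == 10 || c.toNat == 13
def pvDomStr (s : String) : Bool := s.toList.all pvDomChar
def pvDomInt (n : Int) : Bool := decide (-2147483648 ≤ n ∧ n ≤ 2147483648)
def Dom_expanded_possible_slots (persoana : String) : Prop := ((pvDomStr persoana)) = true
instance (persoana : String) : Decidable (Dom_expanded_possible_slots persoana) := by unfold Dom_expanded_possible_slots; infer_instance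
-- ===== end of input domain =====

-- B replaces A's ten branch-local comprehensions by a generate-and-test pass: enumerate the
-- full period x slot x room grid once and filter it with a per-person constraint predicate.

-- ===== PORT A =====
def camere : List Int := [1, 2, 3]

def sloturi : PySem.Dict String (List String) :=
  PySem.Dict.ofList [("M", ["8-10", "10-12"]), ("A", ["12-14", "14-16", "16-18"])]

def perioade : List String := ["M", "A"]

-- sloturi['M'] etc.: the keys "M"/"A" are always present, so getD with [] equals Python's lookup
def expanded_possible_slots (persoana : String) : List (String × Int) :=
  if persoana == "P1" then
    (PySem.Dict.getD sloturi "M" []).flatMap (fun slot => ([2, 3] : List Int).map (fun r => (slot, r)))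
  else if persoana == "P2" then
    (PySem.Dict.getD sloturi "M" []).flatMap (fun slot => camere.map (fun r => (slot, r)))
  else if persoana == "P3" then
    (PySem.Dict.getD sloturi "A" []).map (fun slot => (slot, (3 : Int)))
  else if persoana == "P4" then
    (PySem.Dict.getD sloturi "A" []).flatMap (fun slot => ([2, 3] : List Int).map (fun r => (slot, r)))
  else if persoana == "P5" then
    (PySem.Dict.getD sloturi "M" []).map (fun slot => (slot, (1 : Int)))
  else if persoana == "P6" then
    (PySem.Dict.getD sloturi "A" []).flatMap (fun slot => camere.map (fun r => (slot, r)))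
  else if persoana == "P7" then
    perioade.flatMap (fun t => (PySem.Dict.getD sloturi t []).map (fun slot => (slot, (2 : Int))))
  else if persoana == "P8" then
    (PySem.Dict.getD sloturi "A" []).map (fun slot => (slot, (1 : Int)))
  else if persoana == "P9" then
    (PySem.Dict.getD sloturi "M" []).flatMap (fun slot =>
      (camere.filter (fun r => r ≠ 3)).map (fun r => (slot, r)))
  else if persoana == "P10" then
    perioade.flatMap (fun t => (PySem.Dict.getD sloturi t []).flatMap (fun slot => camere.map (fun r => (slot, r))))
  else
    perioade.flatMap (fun t => (PySem.Dict.getD sloturi t []).flatMap (fun slot => camere.map (fun r => (slot, r))))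

-- ===== PORT B =====
-- constraint predicate: may `persoana` sit in room r during period t?
def allowedB (persoana : String) (t : String) (r : Int) : Bool :=
  if persoana == "P1" then t == "M" && (r == 2 || r == 3)
  else if persoana == "P2" then t == "M"
  else if persoana == "P3" then t == "A" && r == 3
  else if persoana == "P4" then t == "A" && (r == 2 || r == 3)
  else if persoana == "P5" then t == "M" && r == 1
  else if persoana == "P6" then t == "A"
  else if persoana == "P7" then r == 2
  else if persoana == "P8" then t == "A" && r == 1
  else if persoana == "P9" then t == "M" && r != 3
  else true

def expanded_possible_slots_alt (persoana : String) : List (String × Int) :=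
  perioade.flatMap (fun t =>
    (PySem.Dict.getD sloturi t []).flatMap (fun slot =>
      (camere.filter (fun r => allowedB persoana t r)).map (fun r => (slot, r))))

-- ===== PRECONDITION & SPEC =====
def Spec_expanded_possible_slots (persoana : String) (out : List (String × Int)) : Prop := out = expanded_possible_slots_alt persoana
instance (persoana : String) (out : List (String × Int)) : Decidable (Spec_expanded_possible_slots persoana out) := by unfold Spec_expanded_possible_slots; infer_instance

-- ===== CLAIM (what is proved, stated in full; the proofs are below) =====
def Claim_equal_expanded_possible_slots : Prop := ∀ (persoana : String), Dom_expanded_possible_slots persoana → Spec_expanded_possible_slots persoana (expanded_possible_slots persoana)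

-- ===== LEMMAS AND PROOFS =====

-- ===== VERDICT (by name: the statement is the Claim_ definition above) =====
theorem expanded_possible_slots_spec : Claim_equal_expanded_possible_slots := by
  intro p _
  unfold Spec_expanded_possible_slots
  by_cases h1 : p = "P1"; · subst h1; rfl
  by_cases h2 : p = "P2"; · subst h2; rfl
  by_cases h3 : p = "P3"; · subst h3; rfl
  by_cases h4 : p = "P4"; · subst h4; rfl
  by_cases h5 : p = "P5"; · subst h5; rfl
  by_cases h6 : p = "P6"; · subst h6; rfl
  by_cases h7 : p = "P7"; · subst h7; rfl
  by_cases h8 : p = "P8"; · subst h8; rfl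
  by_cases h9 : p = "P9"; · subst h9; rfl
  by_cases h10 : p = "P10"; · subst h10; rfl
  simp only [expanded_possible_slots, expanded_possible_slots_alt, allowedB,
    beq_iff_eq, h1, h2, h3, h4, h5, h6, h7, h8, h9, h10, if_false]
  decide
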